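-- pv_equiv track=rewrite | github.com/pc5401/my_BOJ | 백준/Silver/21616. Modern Art/Modern Art.py | solve_canvas
-- ===== SOURCE A (Python) =====
-- def solve_canvas(M: int, N: int, commands: list) -> int:
--     # 0이면 짝수번, 1이면 홀수번
--     rows = [0] * M
--     cols = [0] * N
--
--     for cmd in commands:
--         typ, num = cmd.split()
--         num = int(num) - 1  # 0-indexed로 변환
--         if typ == 'R':
--             rows[num] ^= 1  # toggle
--         else:
--             cols[num] ^= 1  # toggle
--
--     r_count = sum(rows)
--     c_count = sum(cols)
--     gold_cells = r_count * (N - c_count) + (M - r_count) * c_count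
--     return gold_cells
-- ===== SOURCE B (Python) =====
-- def solve_canvas(M: int, N: int, commands: list) -> int:
--     # direct simulation: build the M x N canvas and toggle whole rows/columns
--     grid = [[0] * N for _ in range(M)]
--     for cmd in commands:
--         typ, num = cmd.split()
--         idx = int(num) - 1
--         if typ == 'R':
--             grid[idx] = [v ^ 1 for v in grid[idx]]
--         else:
--             for row in grid:
--                 row[idx] ^= 1
--     return sum(1 for row in grid for v in row if v == 1)
-- ===== Notes on version B (the rewrite author's own statement) =====
-- stated objective: alternative
-- what changed: B replaces A's two parity arrays and closed-form count r*(N-c)+(M-r)*c by a direct simulation: it builds the full M-by-N grid, toggles every cell of the addressed row or column per command, and counts the cells equal to 1 at the end.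
-- outside the precondition, e.g. on solve_canvas(-2, 2, ['C 1']): A returns -2, B returns 0; on solve_canvas(2, -1, ['R 1']): A returns -1, B returns 0
import Mathlib
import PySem

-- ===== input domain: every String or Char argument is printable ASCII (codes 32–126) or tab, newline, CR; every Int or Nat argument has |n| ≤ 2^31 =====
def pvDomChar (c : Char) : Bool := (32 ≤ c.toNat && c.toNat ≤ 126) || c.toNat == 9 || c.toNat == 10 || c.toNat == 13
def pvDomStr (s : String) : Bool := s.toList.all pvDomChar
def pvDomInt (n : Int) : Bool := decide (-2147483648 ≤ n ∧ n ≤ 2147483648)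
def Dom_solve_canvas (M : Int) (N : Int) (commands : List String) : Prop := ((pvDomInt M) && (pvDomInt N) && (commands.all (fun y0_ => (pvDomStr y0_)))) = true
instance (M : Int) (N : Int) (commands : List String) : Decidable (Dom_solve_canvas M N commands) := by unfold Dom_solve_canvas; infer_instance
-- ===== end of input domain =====

-- B replaces A's parity-array bookkeeping and closed-form count by a direct full-grid
-- simulation (toggle every cell of the addressed row/column, then count the 1-cells);
-- objective: alternative (a structurally different, equally exact implementation).

-- ===== PORT A =====
-- `xs[i] ^= 1` (this statement occurs literally in both Pythons); an out-of-range index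
-- is an IndexError in Python and is excluded by Pre_, here the set is a no-op.
def pyToggle (xs : List Int) (i : Int) : List Int :=
  PySem.List.pySetD xs i (PySem.Int.bxor (PySem.List.pyGetD xs i 0) 1)

-- the body of A's `for cmd in commands` loop, acting on the state (rows, cols)
def solveStepA (st : List Int × List Int) (cmd : String) : List Int × List Int :=
  match PySem.Str.split₀ cmd with
  | [typ, num] =>
    match PySem.Int.ofStr? num with
    | some k =>
      if typ == "R" then (pyToggle st.1 (k - 1), st.2)
      else (st.1, pyToggle st.2 (k - 1))
    | none => st
  | _ => st

def solve_canvas (M : Int) (N : Int) (commands : List String) : Int :=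
  let st := commands.foldl solveStepA (List.replicate M.toNat 0, List.replicate N.toNat 0)
  let r := st.1.sum
  let c := st.2.sum
  r * (N - c) + (M - r) * c

-- ===== PORT B =====
-- the body of B's loop, acting on the whole grid: `grid[idx] = [v ^ 1 for v in grid[idx]]`
-- for a row command, `for row in grid: row[idx] ^= 1` for a column command
def gridStepB (g : List (List Int)) (cmd : String) : List (List Int) :=
  match PySem.Str.split₀ cmd with
  | [typ, num] =>
    match PySem.Int.ofStr? num with
    | some k =>
      if typ == "R" then
        PySem.List.pySetD g (k - 1)
          ((PySem.List.pyGetD g (k - 1) []).map (fun v => PySem.Int.bxor v 1))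
      else g.map (fun row => pyToggle row (k - 1))
    | none => g
  | _ => g

def solve_canvas_alt (M : Int) (N : Int) (commands : List String) : Int :=
  let g := commands.foldl gridStepB (List.replicate M.toNat (List.replicate N.toNat 0))
  let cnt : Nat := (g.map (fun row => (row.filter (fun v => v == 1)).length)).sum
  (cnt : Int)

-- ===== PRECONDITION & SPEC =====
-- a command A accepts: exactly two whitespace-separated tokens, the second an int literal
-- naming a Python-valid (possibly negative) index into the addressed row/column array
def validCmd (M : Int) (N : Int) (cmd : String) : Bool :=
  match PySem.Str.split₀ cmd with
  | [typ, num] =>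
    match PySem.Int.ofStr? num with
    | some k =>
      decide (-(if typ == "R" then M else N) ≤ k - 1 ∧ k - 1 < (if typ == "R" then M else N))
    | none => false
  | _ => false

-- Pre_ excludes (a) commands on which A raises (bad parse, int() failure, index out of
-- range), and (b) the out-of-natural-domain case of a NEGATIVE canvas dimension together
-- with a nonempty command list, where A's closed formula can return a negative cell count
-- while B's empty grid yields 0.
def Pre_solve_canvas (M : Int) (N : Int) (commands : List String) : Prop :=
  (0 ≤ M ∧ 0 ≤ N ∨ commands = []) ∧ ∀ cmd ∈ commands, validCmd M N cmd = true

instance (M : Int) (N : Int) (commands : List String) : Decidable (Pre_solve_canvas M N commands) := by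
  unfold Pre_solve_canvas; infer_instance

def pvWitness_solve_canvas : Int × Int × List String := (2, 3, ["R 1", "C 2"])

def Spec_solve_canvas (M : Int) (N : Int) (commands : List String) (out : Int) : Prop :=
  out = solve_canvas_alt M N commands
instance (M : Int) (N : Int) (commands : List String) (out : Int) : Decidable (Spec_solve_canvas M N commands out) := by
  unfold Spec_solve_canvas; infer_instance

-- ===== CLAIM (what is proved, stated in full; the proofs are below) =====
def Claim_equal_solve_canvas : Prop := ∀ (M : Int) (N : Int) (commands : List String), Dom_solve_canvas M N commands → Pre_solve_canvas M N commands → Spec_solve_canvas M N commands (solve_canvas M N commands)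

-- ===== LEMMAS AND PROOFS =====

def Is01 (xs : List Int) : Prop := ∀ v ∈ xs, v = 0 ∨ v = 1

-- the intended relation between B's grid and A's parity arrays: cell (i,j) = rows[i] xor cols[j]
def mkGrid (rows cols : List Int) : List (List Int) :=
  rows.map (fun a => cols.map (fun c => PySem.Int.bxor a c))

lemma bxor01 {a c : Int} (ha : a = 0 ∨ a = 1) (hc : c = 0 ∨ c = 1) :
    PySem.Int.bxor a c = 0 ∨ PySem.Int.bxor a c = 1 := by
  rcases ha with ha | ha <;> rcases hc with hc | hc <;> subst ha <;> subst hc <;> decide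

lemma bxor_swap1 {a c : Int} (ha : a = 0 ∨ a = 1) (hc : c = 0 ∨ c = 1) :
    PySem.Int.bxor (PySem.Int.bxor a c) 1 = PySem.Int.bxor (PySem.Int.bxor a 1) c := by
  rcases ha with ha | ha <;> rcases hc with hc | hc <;> subst ha <;> subst hc <;> decide

lemma bxor_swap2 {a c : Int} (ha : a = 0 ∨ a = 1) (hc : c = 0 ∨ c = 1) :
    PySem.Int.bxor (PySem.Int.bxor a c) 1 = PySem.Int.bxor a (PySem.Int.bxor c 1) := by
  rcases ha with ha | ha <;> rcases hc with hc | hc <;> subst ha <;> subst hc <;> decide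

lemma pyIdx?_lt {n : Nat} {i : Int} {j : Nat} (h : PySem.List.pyIdx? n i = some j) : j < n := by
  unfold PySem.List.pyIdx? at h
  split_ifs at h with h1 h2 h3 <;> simp_all <;> omega

lemma pyToggle_eq (xs : List Int) (i : Int) :
    pyToggle xs i =
      match PySem.List.pyIdx? xs.length i with
      | some j => xs.set j (PySem.Int.bxor (xs.getD j 0) 1)
      | none => xs := by
  unfold pyToggle PySem.List.pySetD PySem.List.pySet? PySem.List.pyGetD PySem.List.pyGet?
  cases h : PySem.List.pyIdx? xs.length i with
  | none => simp [h]
  | some j => simp [h, List.getD]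

lemma length_pyToggle (xs : List Int) (i : Int) : (pyToggle xs i).length = xs.length := by
  rw [pyToggle_eq]
  cases h : PySem.List.pyIdx? xs.length i <;> simp

lemma is01_pyToggle {xs : List Int} (h : Is01 xs) (i : Int) : Is01 (pyToggle xs i) := by
  rw [pyToggle_eq]
  cases hj : PySem.List.pyIdx? xs.length i with
  | none => exact h
  | some j =>
    intro v hv
    rcases List.mem_or_eq_of_mem_set hv with hv | hv
    · exact h v hv
    · subst hv
      have hjlt := pyIdx?_lt hj
      rw [List.getD_eq_getElem xs 0 hjlt]
      exact bxor01 (h _ (xs.getElem_mem hjlt)) (Or.inr rfl)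

-- a row command on the grid is a row toggle on A's rows
lemma grid_row_step {rows cols : List Int} (hr : Is01 rows) (hc : Is01 cols) (i : Int) :
    PySem.List.pySetD (mkGrid rows cols) i
        ((PySem.List.pyGetD (mkGrid rows cols) i []).map (fun v => PySem.Int.bxor v 1))
      = mkGrid (pyToggle rows i) cols := by
  have hlen : (mkGrid rows cols).length = rows.length := by simp [mkGrid]
  rw [pyToggle_eq]
  unfold PySem.List.pySetD PySem.List.pySet? PySem.List.pyGetD PySem.List.pyGet?
  rw [hlen]
  cases hj : PySem.List.pyIdx? rows.length i with
  | none => simp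
  | some j =>
    have hjlt := pyIdx?_lt hj
    have hjlt' : j < (mkGrid rows cols).length := by rw [hlen]; exact hjlt
    simp only [Option.bind_some, Option.getD_some, Option.map_some]
    rw [List.getElem?_eq_getElem hjlt']
    simp only [Option.getD_some]
    have hget : (mkGrid rows cols)[j] = cols.map (fun c => PySem.Int.bxor rows[j] c) := by
      simp [mkGrid]
    rw [hget, List.getD_eq_getElem rows 0 hjlt]
    unfold mkGrid
    rw [List.map_set, List.map_map]
    congr 1
    apply List.map_congr_left
    intro c hcmem
    simp only [Function.comp_apply]
    exact bxor_swap1 (hr _ (rows.getElem_mem hjlt)) (hc _ hcmem)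

-- a column command on the grid is a column toggle on A's cols
lemma grid_col_step {rows cols : List Int} (hr : Is01 rows) (hc : Is01 cols) (i : Int) :
    (mkGrid rows cols).map (fun row => pyToggle row i) = mkGrid rows (pyToggle cols i) := by
  unfold mkGrid
  rw [List.map_map]
  apply List.map_congr_left
  intro a hamem
  have ha := hr a hamem
  show pyToggle (cols.map (fun c => PySem.Int.bxor a c)) i
      = (pyToggle cols i).map (fun c => PySem.Int.bxor a c)
  rw [pyToggle_eq, pyToggle_eq]
  have hlen : (cols.map (fun c => PySem.Int.bxor a c)).length = cols.length := by simp
  rw [hlen]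
  cases hj : PySem.List.pyIdx? cols.length i with
  | none => simp
  | some j =>
    have hjlt := pyIdx?_lt hj
    have hjlt' : j < (cols.map (fun c => PySem.Int.bxor a c)).length := by rw [hlen]; exact hjlt
    dsimp only
    rw [List.map_set]
    congr 1
    rw [List.getD_eq_getElem _ 0 hjlt', List.getD_eq_getElem cols 0 hjlt]
    simp only [List.getElem_map]
    exact bxor_swap2 ha (hc _ (cols.getElem_mem hjlt))

-- one loop iteration preserves the grid ↔ (rows, cols) relation
lemma step_inv {rows cols : List Int} (hr : Is01 rows) (hc : Is01 cols) (cmd : String) :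
    gridStepB (mkGrid rows cols) cmd
      = mkGrid (solveStepA (rows, cols) cmd).1 (solveStepA (rows, cols) cmd).2 := by
  unfold gridStepB solveStepA
  cases hs : PySem.Str.split₀ cmd with
  | nil => rfl
  | cons t rest =>
    cases rest with
    | nil => rfl
    | cons n rest2 =>
      cases rest2 with
      | cons _ _ => rfl
      | nil =>
        dsimp only
        cases ho : PySem.Int.ofStr? n with
        | none => rfl
        | some k =>
          by_cases ht : (t == "R") = true
          · simp only [ho, ht, if_true]
            exact grid_row_step hr hc (k - 1)
          · simp only [ho, Bool.not_eq_true] at ht ⊢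
            simp only [ht, Bool.false_eq_true, if_false]
            exact grid_col_step hr hc (k - 1)

lemma stepA_inv {rows cols : List Int} (hr : Is01 rows) (hc : Is01 cols) (cmd : String) :
    Is01 (solveStepA (rows, cols) cmd).1 ∧ Is01 (solveStepA (rows, cols) cmd).2 ∧
      (solveStepA (rows, cols) cmd).1.length = rows.length ∧
      (solveStepA (rows, cols) cmd).2.length = cols.length := by
  unfold solveStepA
  cases hs : PySem.Str.split₀ cmd with
  | nil => exact ⟨hr, hc, rfl, rfl⟩
  | cons t rest =>
    cases rest with
    | nil => exact ⟨hr, hc, rfl, rfl⟩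
    | cons n rest2 =>
      cases rest2 with
      | cons _ _ => exact ⟨hr, hc, rfl, rfl⟩
      | nil =>
        dsimp only
        cases ho : PySem.Int.ofStr? n with
        | none => exact ⟨hr, hc, rfl, rfl⟩
        | some k =>
          by_cases ht : (t == "R") = true
          · simp only [ht, if_true]
            exact ⟨is01_pyToggle hr _, hc, length_pyToggle _ _, trivial⟩
          · simp only [Bool.not_eq_true] at ht
            simp only [ht, Bool.false_eq_true, if_false]
            exact ⟨hr, is01_pyToggle hc _, trivial, length_pyToggle _ _⟩

lemma fold_inv (cmds : List String) :
    ∀ (rows cols : List Int), Is01 rows → Is01 cols →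
      cmds.foldl gridStepB (mkGrid rows cols)
          = mkGrid (cmds.foldl solveStepA (rows, cols)).1 (cmds.foldl solveStepA (rows, cols)).2
        ∧ Is01 (cmds.foldl solveStepA (rows, cols)).1
        ∧ Is01 (cmds.foldl solveStepA (rows, cols)).2
        ∧ (cmds.foldl solveStepA (rows, cols)).1.length = rows.length
        ∧ (cmds.foldl solveStepA (rows, cols)).2.length = cols.length := by
  induction cmds with
  | nil => intro rows cols hr hc; exact ⟨rfl, hr, hc, rfl, rfl⟩
  | cons cmd cmds ih =>
    intro rows cols hr hc
    obtain ⟨h1, h2, h3, h4⟩ := stepA_inv hr hc cmd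
    have hstep := step_inv hr hc cmd
    obtain ⟨g1, g2, g3, g4, g5⟩ :=
      ih (solveStepA (rows, cols) cmd).1 (solveStepA (rows, cols) cmd).2 h1 h2
    have hx : ((solveStepA (rows, cols) cmd).1, (solveStepA (rows, cols) cmd).2)
        = solveStepA (rows, cols) cmd := rfl
    rw [hx] at g1 g2 g3 g4 g5
    simp only [List.foldl_cons, hstep]
    exact ⟨g1, g2, g3, h3 ▸ g4, h4 ▸ g5⟩

lemma count_row {cols : List Int} (hc : Is01 cols) {a : Int} (ha : a = 0 ∨ a = 1) :
    ((((cols.map (fun c => PySem.Int.bxor a c)).filter (fun v => v == 1)).length : Nat) : Int)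
      = if a = 1 then (cols.length : Int) - cols.sum else cols.sum := by
  induction cols with
  | nil => simp
  | cons c l ih =>
    have hcc := hc c List.mem_cons_self
    have hl : Is01 l := fun v hv => hc v (List.mem_cons_of_mem c hv)
    have hih := ih hl
    have e00 : PySem.Int.bxor 0 0 = 0 := by decide
    have e01 : PySem.Int.bxor 0 1 = 1 := by decide
    have e10 : PySem.Int.bxor 1 0 = 1 := by decide
    have e11 : PySem.Int.bxor 1 1 = 0 := by decide
    rcases ha with ha | ha <;> rcases hcc with hcc | hcc <;> subst ha <;> subst hcc <;>
      simp only [List.map_cons, List.filter_cons, e00, e01, e10, e11, List.sum_cons,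
        List.length_cons] at hih ⊢ <;>
      norm_num at hih ⊢ <;> rw [hih] <;> push_cast <;> ring

lemma count_grid {rows cols : List Int} (hr : Is01 rows) (hc : Is01 cols) :
    ((((mkGrid rows cols).map (fun row => (row.filter (fun v => v == 1)).length)).sum : Nat) : Int)
      = rows.sum * ((cols.length : Int) - cols.sum)
        + ((rows.length : Int) - rows.sum) * cols.sum := by
  induction rows with
  | nil => simp [mkGrid]
  | cons a l ih =>
    have ha := hr a List.mem_cons_self
    have hl : Is01 l := fun v hv => hr v (List.mem_cons_of_mem a hv)
    have hrow := count_row hc ha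
    have hrest := ih hl
    unfold mkGrid at *
    simp only [List.map_cons, List.sum_cons, List.length_cons, Nat.cast_add]
    rw [hrow, hrest]
    rcases ha with ha | ha <;> subst ha <;> norm_num <;> push_cast <;> ring

lemma is01_replicate (n : Nat) : Is01 (List.replicate n (0 : Int)) := by
  intro v hv
  rcases List.mem_replicate.mp hv with ⟨_, h⟩
  exact Or.inl h

lemma mkGrid_init (m n : Nat) :
    mkGrid (List.replicate m 0) (List.replicate n 0)
      = List.replicate m (List.replicate n (0 : Int)) := by
  have h00 : PySem.Int.bxor 0 0 = 0 := by decide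
  simp only [mkGrid, List.map_replicate, h00]

-- ===== VERDICT (by name: the statement is the Claim_ definition above) =====
theorem solve_canvas_spec : Claim_equal_solve_canvas := by
  intro M N commands _ hpre
  show solve_canvas M N commands = solve_canvas_alt M N commands
  simp only [solve_canvas, solve_canvas_alt]
  obtain ⟨hd, -⟩ := hpre
  obtain ⟨⟨g1, g2, g3, g4, g5⟩⟩ :
      _ ∧ True := ⟨fold_inv commands (List.replicate M.toNat 0) (List.replicate N.toNat 0)
        (is01_replicate _) (is01_replicate _), trivial⟩
  rw [← mkGrid_init, g1, count_grid g2 g3]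
  rw [g4, g5]
  simp only [List.length_replicate]
  rcases hd with ⟨hM, hN⟩ | hnil
  · rw [Int.toNat_of_nonneg hM, Int.toNat_of_nonneg hN]
  · subst hnil
    simp only [List.foldl_nil, List.sum_replicate, smul_zero]
    ring
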